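-- pv_equiv track=rewrite | github.com/NEBULA1978/ejercicios-PY | ejercicio10.py | escalera
-- ===== SOURCE A (Python) =====
-- def escalera(numero):
--     escalera_completa = ""
--
--     for nivel in range(1, numero+1):
--         escalones = ""
--
--         for escalon in range(1, nivel+1):
--             escalones += "[-]"
--
--         escalera_completa += escalones + '\n'
--
--     return escalera_completa
-- ===== SOURCE B (Python) =====
-- def escalera(numero):
--     row = ""
--     out = ""
--     for nivel in range(numero):
--         row += "[-]"
--         out += row + "\n"
--     return out
-- ===== Notes on version B (the rewrite author's own statement) =====
-- stated objective: alternative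
-- what changed: B maintains a running row string extended by one "[-]" per level in a single loop, instead of A's nested loop that rebuilds each row from scratch; it trades the inner loop for a maintained running prefix.
import Mathlib
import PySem

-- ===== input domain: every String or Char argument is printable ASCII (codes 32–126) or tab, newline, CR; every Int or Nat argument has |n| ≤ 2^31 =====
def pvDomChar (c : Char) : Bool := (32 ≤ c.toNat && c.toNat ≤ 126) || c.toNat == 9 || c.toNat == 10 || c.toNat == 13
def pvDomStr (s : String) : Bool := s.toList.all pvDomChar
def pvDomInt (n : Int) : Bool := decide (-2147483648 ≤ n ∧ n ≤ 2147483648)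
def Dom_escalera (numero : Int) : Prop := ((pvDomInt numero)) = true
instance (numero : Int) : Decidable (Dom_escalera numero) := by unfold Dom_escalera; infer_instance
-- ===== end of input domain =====

-- B replaces A's nested row-rebuilding loops with a single loop maintaining a running row string.


-- ===== PORT A =====
-- literal port: outer loop over range(1, numero+1), inner loop rebuilding each row
def escalera (numero : Int) : String :=
  (PySem.List.pyRange 1 (numero + 1) 1).foldl
    (fun escalera_completa nivel =>
      escalera_completa ++
        ((PySem.List.pyRange 1 (nivel + 1) 1).foldl (fun escalones _ => escalones ++ "[-]") "")
        ++ "\n")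
    ""

-- ===== PORT B =====
-- literal port of Source B: one loop over range(numero) with running (row, out) state
def escalera_alt (numero : Int) : String :=
  ((PySem.List.pyRange 0 numero 1).foldl
    (fun p _ =>
      let row := p.1 ++ "[-]"
      (row, p.2 ++ (row ++ "\n")))
    ("", "")).2

-- ===== PRECONDITION & SPEC =====
def Spec_escalera (numero : Int) (out : String) : Prop := out = escalera_alt numero
instance (numero : Int) (out : String) : Decidable (Spec_escalera numero out) := by unfold Spec_escalera; infer_instance

-- ===== CLAIM (what is proved, stated in full; the proofs are below) =====
def Claim_equal_escalera : Prop := ∀ (numero : Int), Dom_escalera numero → Spec_escalera numero (escalera numero)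

-- ===== LEMMAS AND PROOFS =====

/-- "[-]" repeated n times. -/
def pvRep : Nat → String
  | 0 => ""
  | n + 1 => "[-]" ++ pvRep n

theorem pvRep_succ_right (n : Nat) : pvRep (n + 1) = pvRep n ++ "[-]" := by
  induction n with
  | zero => rfl
  | succ k ih =>
      show "[-]" ++ pvRep (k + 1) = ("[-]" ++ pvRep k) ++ "[-]"
      rw [ih, String.append_assoc]

theorem pvInner_fold (l : List Int) (s : String) :
    l.foldl (fun escalones _ => escalones ++ "[-]") s = s ++ pvRep l.length := by
  induction l generalizing s with
  | nil => simp [pvRep]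
  | cons x xs ih =>
      simp only [List.foldl_cons, List.length_cons, ih, pvRep_succ_right]
      rw [String.append_assoc]
      rw [show pvRep xs.length ++ "[-]" = "[-]" ++ pvRep xs.length from (pvRep_succ_right xs.length).symm ▸ rfl]

theorem escalera_succ (n : Nat) :
    escalera ((n : Int) + 1) = escalera (n : Int) ++ (pvRep (n + 1) ++ "\n") := by
  unfold escalera
  rw [PySem.List.pyRange_one_succ_right (a := 1) (b := (n : Int) + 1) (by omega),
      List.foldl_append]
  simp only [List.foldl_cons, List.foldl_nil]
  have hl : (PySem.List.pyRange 1 ((n : Int) + 1 + 1) 1).length = n + 1 := by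
    rw [PySem.List.length_pyRange_one]; omega
  rw [pvInner_fold, hl]
  simp [String.append_assoc]

theorem pvBstate (n : Nat) :
    (PySem.List.pyRange 0 (n : Int) 1).foldl
      (fun p (_ : Int) =>
        let row := p.1 ++ "[-]"
        (row, p.2 ++ (row ++ "\n")))
      ("", "") = (pvRep n, escalera (n : Int)) := by
  induction n with
  | zero =>
      simp [PySem.List.pyRange_one_eq_nil, pvRep, escalera]
  | succ k ih =>
      rw [show ((k + 1 : Nat) : Int) = (k : Int) + 1 by omega]
      rw [PySem.List.pyRange_one_succ_right (a := 0) (b := (k : Int)) (by omega),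
          List.foldl_append, ih]
      simp only [List.foldl_cons, List.foldl_nil]
      rw [escalera_succ k]
      refine Prod.ext ?_ ?_
      · show pvRep k ++ "[-]" = pvRep (k + 1)
        rw [pvRep_succ_right]
      · show escalera (k : Int) ++ ((pvRep k ++ "[-]") ++ "\n") = _
        rw [← pvRep_succ_right]

-- ===== VERDICT (by name: the statement is the Claim_ definition above) =====
theorem escalera_spec : Claim_equal_escalera := by
  intro numero _
  unfold Spec_escalera
  by_cases h : numero ≤ 0
  · unfold escalera escalera_alt
    rw [PySem.List.pyRange_one_eq_nil (by omega), PySem.List.pyRange_one_eq_nil h]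
    rfl
  · obtain ⟨n, rfl⟩ : ∃ n : Nat, numero = (n : Int) :=
      ⟨numero.toNat, by omega⟩
    unfold escalera_alt
    rw [pvBstate]
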